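-- pv_equiv track=rewrite | github.com/msaad00/agent-bom | src/agent_bom/compliance_hub_ingest.py | _resolve_csv_field
-- ===== SOURCE A (Python) =====
-- def _resolve_csv_field(row: dict[str, str], candidates: tuple[str, ...]) -> str:
--     for key in candidates:
--         for header in row:
--             if header.lower().replace(" ", "_") == key:
--                 value = row[header]
--                 if value:
--                     return str(value).strip()
--     return ""
-- ===== SOURCE B (Python) =====
-- def _resolve_csv_field(row: dict[str, str], candidates: tuple[str, ...]) -> str:
--     index = {}
--     for header, value in row.items():
--         if value:
--             key = header.lower().replace(" ", "_")
--             if key not in index: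
--                 index[key] = str(value).strip()
--     for key in candidates:
--         if key in index:
--             return index[key]
--     return ""
-- ===== Notes on version B (the rewrite author's own statement) =====
-- stated objective: idiomatic
-- what changed: Replaces the nested candidates-by-headers scan with a single pass that builds a dict from normalized header to first non-empty stripped value, then a flat lookup pass over candidates.
import Mathlib
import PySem

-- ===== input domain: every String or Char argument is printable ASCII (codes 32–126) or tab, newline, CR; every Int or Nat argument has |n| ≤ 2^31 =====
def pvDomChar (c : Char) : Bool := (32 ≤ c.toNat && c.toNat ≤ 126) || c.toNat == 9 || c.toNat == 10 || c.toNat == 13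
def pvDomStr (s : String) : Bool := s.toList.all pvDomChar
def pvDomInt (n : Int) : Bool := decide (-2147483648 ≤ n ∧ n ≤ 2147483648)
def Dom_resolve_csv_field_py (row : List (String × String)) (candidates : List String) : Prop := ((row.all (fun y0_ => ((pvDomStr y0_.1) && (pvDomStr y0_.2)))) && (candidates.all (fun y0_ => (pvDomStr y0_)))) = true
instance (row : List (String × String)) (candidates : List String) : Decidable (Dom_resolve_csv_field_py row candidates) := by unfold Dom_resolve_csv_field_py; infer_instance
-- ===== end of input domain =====

-- B replaces A's nested candidates×headers scan with a one-pass normalized-header index plus a flat candidate lookup (idiomatic; same results).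


-- ===== PORT A =====
-- header.lower().replace(" ", "_")
def pvNorm (h : String) : String := PySem.Str.replace (PySem.Str.lower h) " " "_"

-- inner 'for header in row' loop for one candidate key; iterates the dict's items
-- (row[header] is the value paired with header, since dict keys are unique);
-- 'some v' = the early 'return str(value).strip()', 'none' = inner loop fell through
def pvScanA (key : String) : List (String × String) → Option String
  | [] => none
  | (h, v) :: rest =>
    if pvNorm h = key then
      if v ≠ "" then some (PySem.Str.strip v) else pvScanA key rest
    else pvScanA key rest

-- outer 'for key in candidates' loop
def pvOuterA (items : List (String × String)) : List String → String
  | [] => ""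
  | key :: rest =>
    match pvScanA key items with
    | some v => v
    | none => pvOuterA items rest

def resolve_csv_field_py (row : List (String × String)) (candidates : List String) : String :=
  pvOuterA (PySem.Dict.ofList row).items candidates

-- ===== PORT B =====
-- 'for header, value in row.items(): if value: … if key not in index: index[key] = str(value).strip()'
def pvBuildIdx : List (String × String) → PySem.Dict String String → PySem.Dict String String
  | [], d => d
  | (h, v) :: rest, d =>
    if v ≠ "" then
      if d.contains (pvNorm h) then pvBuildIdx rest d
      else pvBuildIdx rest (d.insert (pvNorm h) (PySem.Str.strip v))
    else pvBuildIdx rest d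

-- 'for key in candidates: if key in index: return index[key]'
def pvLookupB (idx : PySem.Dict String String) : List String → String
  | [] => ""
  | key :: rest => if idx.contains key then idx.getD key "" else pvLookupB idx rest

def resolve_csv_field_py_alt (row : List (String × String)) (candidates : List String) : String :=
  pvLookupB (pvBuildIdx (PySem.Dict.ofList row).items PySem.Dict.empty) candidates

-- ===== PRECONDITION & SPEC =====
def Spec_resolve_csv_field_py (row : List (String × String)) (candidates : List String) (out : String) : Prop := out = resolve_csv_field_py_alt row candidates
instance (row : List (String × String)) (candidates : List String) (out : String) : Decidable (Spec_resolve_csv_field_py row candidates out) := by unfold Spec_resolve_csv_field_py; infer_instance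

-- ===== CLAIM (what is proved, stated in full; the proofs are below) =====
def Claim_equal_resolve_csv_field_py : Prop := ∀ (row : List (String × String)) (candidates : List String), Dom_resolve_csv_field_py row candidates → Spec_resolve_csv_field_py row candidates (resolve_csv_field_py row candidates)

-- ===== LEMMAS AND PROOFS =====

-- the index B builds answers, for every key, exactly A's inner scan (first non-empty
-- value among matching headers), behind whatever the accumulator already holds
theorem pvBuildIdx_get? (L : List (String × String)) (d : PySem.Dict String String)
    (k : String) : (pvBuildIdx L d).get? k = (d.get? k).or (pvScanA k L) := by
  induction L generalizing d with
  | nil => simp [pvBuildIdx, pvScanA]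
  | cons p rest ih =>
    obtain ⟨h, v⟩ := p
    by_cases hv : v = ""
    · simp [pvBuildIdx, pvScanA, hv, ih]
    · by_cases hk : pvNorm h = k
      · subst hk
        by_cases hc : d.contains (pvNorm h) = true
        · have hs : (d.get? (pvNorm h)).isSome := by
            rw [← PySem.Dict.contains_eq_isSome_get?]; exact hc
          obtain ⟨w, hw⟩ := Option.isSome_iff_exists.mp hs
          simp [pvBuildIdx, pvScanA, hv, hc, ih, hw]
        · have hn : d.get? (pvNorm h) = none := by
            rw [PySem.Dict.get?_eq_none_iff_contains]
            simpa using hc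
          simp [pvBuildIdx, pvScanA, hv, hc, ih, hn, PySem.Dict.get?_insert_self]
      · by_cases hc : d.contains (pvNorm h) = true
        · simp [pvBuildIdx, pvScanA, hv, hc, hk, ih]
        · simp [pvBuildIdx, pvScanA, hv, hc, hk, ih,
            PySem.Dict.get?_insert_of_ne _ _ (fun e => hk e.symm)]

theorem pvLookup_eq_outer (items : List (String × String)) (cs : List String) :
    pvLookupB (pvBuildIdx items PySem.Dict.empty) cs = pvOuterA items cs := by
  induction cs with
  | nil => simp [pvLookupB, pvOuterA]
  | cons k rest ih =>
    have hg : (pvBuildIdx items PySem.Dict.empty).get? k = pvScanA k items := by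
      simp [pvBuildIdx_get?]
    have hcont : (pvBuildIdx items PySem.Dict.empty).contains k = (pvScanA k items).isSome := by
      rw [PySem.Dict.contains_eq_isSome_get?, hg]
    cases hs : pvScanA k items with
    | none => simp [pvLookupB, pvOuterA, hcont, hs, ih]
    | some v =>
      simp [pvLookupB, pvOuterA, hcont, hs, PySem.Dict.getD_eq_get?_getD, hg]

-- ===== VERDICT (by name: the statement is the Claim_ definition above) =====
theorem resolve_csv_field_py_spec : Claim_equal_resolve_csv_field_py := by
  intro row candidates _
  unfold Spec_resolve_csv_field_py resolve_csv_field_py resolve_csv_field_py_alt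
  exact (pvLookup_eq_outer _ _).symm
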